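-- pv_equiv track=rewrite | github.com/Minh110/DEAP_Evolutionary_Algorithm | DEAP_Evo_code.py | payoff_to_ind1
-- ===== SOURCE A (Python) =====
-- def payoff_to_ind1(individual1, individual2, individual3, game):
--     if(len(individual1) == (len(individual2) and len(individual3))):
--         payoff = []
--
--         for i in range(len(individual1)):
--             if individual1[i] == 0:
--                 if individual2[i] == 1 and individual3[i] == 1:
--                     payoff.append(game[1][0][0])
--                 if individual2[i] == 1 and individual3[i] == 0:
--                     payoff.append(game[1][1][0])
--                 if individual2[i] == 0 and individual3[i] == 1:
--                     payoff.append(game[1][2][0])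
--                 if individual2[i] == 0 and individual3[i] == 0:
--                     payoff.append(game[1][3][0])
--
--             if individual1[i] == 1:
--                 if individual2[i] == 1 and individual3[i] == 1:
--                     payoff.append(game[0][0][0])
--                 if individual2[i] == 1 and individual3[i] == 0:
--                     payoff.append(game[0][1][0])
--                 if individual2[i] == 0 and individual3[i] == 1:
--                     payoff.append(game[0][2][0])
--                 if individual2[i] == 0 and individual3[i] == 0:
--                     payoff.append(game[0][3][0])
--
--     # Assuming mem_depth of 2, return the sum of the 2 games
--     return sum(payoff[-2:])
-- ===== SOURCE B (Python) =====
-- def payoff_to_ind1(individual1, individual2, individual3, game):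
--     # backward scan: collect only the last two payoffs and stop early
--     total = 0
--     found = 0
--     i = len(individual1) - 1
--     while i >= 0 and found < 2:
--         a = individual1[i]
--         if a in (0, 1):
--             b = individual2[i]
--             if b in (0, 1):
--                 c = individual3[i]
--                 if c in (0, 1):
--                     total += game[1 - a][2 * (1 - b) + (1 - c)][0]
--                     found += 1
--         i -= 1
--     return total
-- ===== Notes on version B (the rewrite author's own statement) =====
-- stated objective: alternative
-- what changed: Instead of building the whole payoff list front-to-back and slicing its last two entries, B scans the individuals back-to-front with a running sum and a counter, stopping as soon as the two most recent payoffs are found; the eight if-branches become one arithmetic table index. Pre_ excludes inputs where A raises (NameError when the length guard is false, IndexError on short individuals or a malformed game table).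
import Mathlib
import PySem

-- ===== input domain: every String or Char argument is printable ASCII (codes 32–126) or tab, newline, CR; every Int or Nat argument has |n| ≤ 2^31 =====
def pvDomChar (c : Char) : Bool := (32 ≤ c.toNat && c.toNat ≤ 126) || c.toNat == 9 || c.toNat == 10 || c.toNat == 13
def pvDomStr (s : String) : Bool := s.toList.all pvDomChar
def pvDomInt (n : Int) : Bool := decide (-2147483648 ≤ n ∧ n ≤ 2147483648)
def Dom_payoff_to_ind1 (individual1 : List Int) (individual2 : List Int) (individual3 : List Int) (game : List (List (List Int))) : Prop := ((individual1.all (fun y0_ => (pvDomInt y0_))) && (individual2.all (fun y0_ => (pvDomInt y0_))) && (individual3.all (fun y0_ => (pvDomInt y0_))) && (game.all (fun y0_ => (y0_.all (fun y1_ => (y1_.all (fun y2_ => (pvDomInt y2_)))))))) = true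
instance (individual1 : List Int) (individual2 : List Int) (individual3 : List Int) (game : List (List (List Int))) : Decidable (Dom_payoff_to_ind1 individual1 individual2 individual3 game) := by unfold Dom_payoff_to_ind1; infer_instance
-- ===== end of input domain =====

-- ===== PORT A =====

-- B replaces A's build-the-whole-payoff-list-then-slice by a back-to-front scan that sums only
-- the last two payoffs and stops early; the eight if-branches become one arithmetic table index
-- (objective: alternative).

-- game[r][k][0], totalized with defaults; inside Pre_ every access A/B makes is in range, so
-- the defaults are never the returned value there.
def pvCell (game : List (List (List Int))) (r k : Int) : Int :=
  (PySem.List.pyGet? ((PySem.List.pyGet? ((PySem.List.pyGet? game r).getD []) k).getD []) 0).getD 0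

-- ===== PORT A =====
-- the body of A's for-loop, one iteration: the two `if individual1[i] == _` blocks of four appends
def pvStepA (i1 i2 i3 : List Int) (game : List (List (List Int))) (payoff : List Int) (i : Nat) : List Int :=
  let a := (PySem.List.pyGet? i1 (i : Int)).getD 2
  let b := (PySem.List.pyGet? i2 (i : Int)).getD 2
  let c := (PySem.List.pyGet? i3 (i : Int)).getD 2
  let p1 := if a = 0 then
      (let q1 := if b = 1 ∧ c = 1 then payoff ++ [pvCell game 1 0] else payoff
       let q2 := if b = 1 ∧ c = 0 then q1 ++ [pvCell game 1 1] else q1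
       let q3 := if b = 0 ∧ c = 1 then q2 ++ [pvCell game 1 2] else q2
       let q4 := if b = 0 ∧ c = 0 then q3 ++ [pvCell game 1 3] else q3
       q4)
    else payoff
  if a = 1 then
      (let r1 := if b = 1 ∧ c = 1 then p1 ++ [pvCell game 0 0] else p1
       let r2 := if b = 1 ∧ c = 0 then r1 ++ [pvCell game 0 1] else r1
       let r3 := if b = 0 ∧ c = 1 then r2 ++ [pvCell game 0 2] else r2
       let r4 := if b = 0 ∧ c = 0 then r3 ++ [pvCell game 0 3] else r3
       r4)
    else p1

def payoff_to_ind1 (individual1 : List Int) (individual2 : List Int) (individual3 : List Int) (game : List (List (List Int))) : Int :=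
  (PySem.List.slice
    (if individual1.length = (if individual2.length = 0 then 0 else individual3.length) then
       (List.range individual1.length).foldl (pvStepA individual1 individual2 individual3 game) []
     else [])  -- in Python this branch is a NameError (payoff unbound); excluded by Pre_
    (some (-2)) none).sum

-- ===== PORT B =====
-- B's while loop: index runs i-1, i-2, …, 0 (argument n below is i+1, the remaining count);
-- state (found, total); stops when found reaches 2.
def pvGoB (i1 i2 i3 : List Int) (game : List (List (List Int))) : Nat → Nat → Int → Int
  | 0, _, total => total
  | n + 1, found, total =>
    if found < 2 then
      let a := (PySem.List.pyGet? i1 (n : Int)).getD 2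
      if a = 0 ∨ a = 1 then
        let b := (PySem.List.pyGet? i2 (n : Int)).getD 2
        if b = 0 ∨ b = 1 then
          let c := (PySem.List.pyGet? i3 (n : Int)).getD 2
          if c = 0 ∨ c = 1 then
            pvGoB i1 i2 i3 game n (found + 1)
              (total + pvCell game (1 - a) (2 * (1 - b) + (1 - c)))
          else pvGoB i1 i2 i3 game n found total
        else pvGoB i1 i2 i3 game n found total
      else pvGoB i1 i2 i3 game n found total
    else total

def payoff_to_ind1_alt (individual1 : List Int) (individual2 : List Int) (individual3 : List Int) (game : List (List (List Int))) : Int :=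
  pvGoB individual1 individual2 individual3 game individual1.length 0 0

-- ===== PRECONDITION & SPEC =====
def pvCellOK (game : List (List (List Int))) (r k : Int) : Bool :=
  match PySem.List.pyGet? game r with
  | none => false
  | some row =>
    match PySem.List.pyGet? row k with
    | none => false
    | some cell => !cell.isEmpty

-- Pre_ is exactly the set of inputs on which A returns: the length guard holds (otherwise a
-- NameError on the unbound `payoff`), and every element access A actually performs is in range
-- (otherwise an IndexError): individual2[i]/individual3[i] only when the earlier values are 0/1,
-- and the accessed game cell game[1-a][2*(1-b)+(1-c)] exists and is nonempty.
def Pre_payoff_to_ind1 (individual1 : List Int) (individual2 : List Int) (individual3 : List Int) (game : List (List (List Int))) : Prop :=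
  individual1.length = (if individual2.length = 0 then 0 else individual3.length) ∧
  ∀ i < individual1.length,
    (individual1.getD i 2 = 0 ∨ individual1.getD i 2 = 1) →
      i < individual2.length ∧
      ((individual2.getD i 2 = 0 ∨ individual2.getD i 2 = 1) →
        i < individual3.length ∧
        ((individual3.getD i 2 = 0 ∨ individual3.getD i 2 = 1) →
          pvCellOK game (1 - individual1.getD i 2)
            (2 * (1 - individual2.getD i 2) + (1 - individual3.getD i 2)) = true))
instance (individual1 : List Int) (individual2 : List Int) (individual3 : List Int) (game : List (List (List Int))) : Decidable (Pre_payoff_to_ind1 individual1 individual2 individual3 game) := by unfold Pre_payoff_to_ind1; infer_instance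

def pvWitness_payoff_to_ind1 : List Int × List Int × List Int × List (List (List Int)) :=
  ([0, 1], [1, 1], [1, 0], [[[3], [4], [5], [6]], [[7], [8], [9], [10]]])

def Spec_payoff_to_ind1 (individual1 : List Int) (individual2 : List Int) (individual3 : List Int) (game : List (List (List Int))) (out : Int) : Prop := out = payoff_to_ind1_alt individual1 individual2 individual3 game
instance (individual1 : List Int) (individual2 : List Int) (individual3 : List Int) (game : List (List (List Int))) (out : Int) : Decidable (Spec_payoff_to_ind1 individual1 individual2 individual3 game out) := by unfold Spec_payoff_to_ind1; infer_instance

-- ===== CLAIM (what is proved, stated in full; the proofs are below) =====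
def Claim_equal_payoff_to_ind1 : Prop := ∀ (individual1 : List Int) (individual2 : List Int) (individual3 : List Int) (game : List (List (List Int))), Dom_payoff_to_ind1 individual1 individual2 individual3 game → Pre_payoff_to_ind1 individual1 individual2 individual3 game → Spec_payoff_to_ind1 individual1 individual2 individual3 game (payoff_to_ind1 individual1 individual2 individual3 game)

-- ===== LEMMAS AND PROOFS =====

-- the (possibly empty) contribution of index i, shared characterisation of both loops
def pvEmit (i1 i2 i3 : List Int) (game : List (List (List Int))) (i : Nat) : List Int :=
  if (i1.getD i 2 = 0 ∨ i1.getD i 2 = 1) ∧ (i2.getD i 2 = 0 ∨ i2.getD i 2 = 1) ∧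
     (i3.getD i 2 = 0 ∨ i3.getD i 2 = 1) then
    [pvCell game (1 - i1.getD i 2) (2 * (1 - i2.getD i 2) + (1 - i3.getD i 2))]
  else []

-- the payoff list over the first n indices
def pvP (i1 i2 i3 : List Int) (game : List (List (List Int))) (n : Nat) : List Int :=
  (List.range n).flatMap (pvEmit i1 i2 i3 game)

lemma pvStepA_eq (i1 i2 i3 : List Int) (game : List (List (List Int))) (payoff : List Int) (i : Nat) :
    pvStepA i1 i2 i3 game payoff i = payoff ++ pvEmit i1 i2 i3 game i := by
  simp only [pvStepA, pvEmit, PySem.List.pyGet?_natCast, ← List.getD_eq_getElem?_getD]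
  set a := i1.getD i 2 with ha
  set b := i2.getD i 2 with hb
  set c := i3.getD i 2 with hc
  clear ha hb hc
  by_cases h0 : a = 0 <;> by_cases h1 : a = 1 <;>
    by_cases hb0 : b = 0 <;> by_cases hb1 : b = 1 <;>
    by_cases hc0 : c = 0 <;> by_cases hc1 : c = 1 <;>
    simp_all

lemma pvFoldAppend {α β : Type} (g : α → List β) :
    ∀ (l : List α) (init : List β),
      l.foldl (fun acc i => acc ++ g i) init = init ++ l.flatMap g := by
  intro l
  induction l with
  | nil => simp
  | cons x xs ih => intro init; simp [List.foldl_cons, ih, List.append_assoc]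

-- sum of the last k elements, appending one more element
lemma pvDropSum (l : List Int) (x : Int) (k : Nat) (hk : 1 ≤ k) :
    ((l ++ [x]).drop ((l ++ [x]).length - k)).sum
      = (l.drop (l.length - (k - 1))).sum + x := by
  have hle : l.length - (k - 1) ≤ l.length := Nat.sub_le _ _
  have hidx : (l ++ [x]).length - k = l.length - (k - 1) := by
    simp [List.length_append]; omega
  rw [hidx, List.drop_append_of_le_length hle, List.sum_append]
  simp

-- B's loop computes: total plus the sum of the last (2 - found) entries of the payoff list
lemma pvGoB_eq (i1 i2 i3 : List Int) (game : List (List (List Int))) :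
    ∀ (n found : Nat) (total : Int), found ≤ 2 →
      pvGoB i1 i2 i3 game n found total
        = total + ((pvP i1 i2 i3 game n).drop ((pvP i1 i2 i3 game n).length - (2 - found))).sum := by
  intro n
  induction n with
  | zero => intro found total _; simp [pvGoB, pvP]
  | succ n ih =>
    intro found total hf
    have hP : pvP i1 i2 i3 game (n + 1) = pvP i1 i2 i3 game n ++ pvEmit i1 i2 i3 game n := by
      simp [pvP, List.range_succ]
    by_cases hlt : found < 2
    · have hemit : pvEmit i1 i2 i3 game n =
        (if ((PySem.List.pyGet? i1 (n : Int)).getD 2 = 0 ∨ (PySem.List.pyGet? i1 (n : Int)).getD 2 = 1) ∧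
            ((PySem.List.pyGet? i2 (n : Int)).getD 2 = 0 ∨ (PySem.List.pyGet? i2 (n : Int)).getD 2 = 1) ∧
            ((PySem.List.pyGet? i3 (n : Int)).getD 2 = 0 ∨ (PySem.List.pyGet? i3 (n : Int)).getD 2 = 1) then
          [pvCell game (1 - (PySem.List.pyGet? i1 (n : Int)).getD 2)
            (2 * (1 - (PySem.List.pyGet? i2 (n : Int)).getD 2) + (1 - (PySem.List.pyGet? i3 (n : Int)).getD 2))]
        else []) := by
        simp [pvEmit, PySem.List.pyGet?_natCast, ← List.getD_eq_getElem?_getD]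
      by_cases ha : (PySem.List.pyGet? i1 (n : Int)).getD 2 = 0 ∨ (PySem.List.pyGet? i1 (n : Int)).getD 2 = 1
      · by_cases hb : (PySem.List.pyGet? i2 (n : Int)).getD 2 = 0 ∨ (PySem.List.pyGet? i2 (n : Int)).getD 2 = 1
        · by_cases hc : (PySem.List.pyGet? i3 (n : Int)).getD 2 = 0 ∨ (PySem.List.pyGet? i3 (n : Int)).getD 2 = 1
          · -- a payoff is emitted at index n
            have hx : pvEmit i1 i2 i3 game n =
                [pvCell game (1 - (PySem.List.pyGet? i1 (n : Int)).getD 2)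
                  (2 * (1 - (PySem.List.pyGet? i2 (n : Int)).getD 2) + (1 - (PySem.List.pyGet? i3 (n : Int)).getD 2))] := by
              rw [hemit, if_pos ⟨ha, hb, hc⟩]
            rw [pvGoB, if_pos hlt, if_pos ha, if_pos hb, if_pos hc,
              ih (found + 1) _ (by omega), hP, hx, pvDropSum _ _ (2 - found) (by omega)]
            have : 2 - (found + 1) = 2 - found - 1 := by omega
            rw [this]; ring
          · have hx : pvEmit i1 i2 i3 game n = [] := by
              rw [hemit, if_neg (by tauto)]
            rw [pvGoB, if_pos hlt, if_pos ha, if_pos hb, if_neg hc, ih found total hf, hP, hx]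
            simp
        · have hx : pvEmit i1 i2 i3 game n = [] := by
            rw [hemit, if_neg (by tauto)]
          rw [pvGoB, if_pos hlt, if_pos ha, if_neg hb, ih found total hf, hP, hx]
          simp
      · have hx : pvEmit i1 i2 i3 game n = [] := by
          rw [hemit, if_neg (by tauto)]
        rw [pvGoB, if_pos hlt, if_neg ha, ih found total hf, hP, hx]
        simp
    · have hf2 : found = 2 := by omega
      rw [pvGoB, if_neg hlt, hf2]
      simp

-- ===== VERDICT (by name: the statement is the Claim_ definition above) =====
theorem payoff_to_ind1_spec : Claim_equal_payoff_to_ind1 := by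
  intro i1 i2 i3 game _ hpre
  unfold Spec_payoff_to_ind1 payoff_to_ind1 payoff_to_ind1_alt
  rw [if_pos hpre.1]
  have hstep : pvStepA i1 i2 i3 game = fun payoff i => payoff ++ pvEmit i1 i2 i3 game i :=
    funext fun p => funext fun i => pvStepA_eq i1 i2 i3 game p i
  rw [hstep, pvFoldAppend, List.nil_append,
    PySem.List.slice_from_neg_ofNat _ 2 (by omega),
    pvGoB_eq i1 i2 i3 game i1.length 0 0 (by omega)]
  simp [pvP]
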